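-- pv_equiv track=rewrite | github.com/Novvi113/Data-LOSC | pages/8UEFA Leagues Simulation.py | qualification_percentage
-- ===== SOURCE A (Python) =====
-- def qualification_percentage(team_rankings, total_qualifications):
--     for team in team_rankings.keys():
--         if isinstance(team_rankings[team], list):
--             for i in range(len(team_rankings[team])):
--                 if team_rankings[team][i] <= 8:
--                     total_qualifications[team]['Qualifications'] += 1
--                 elif team_rankings[team][i] <= 24:
--                     total_qualifications[team]['Playoffs'] += 1
--                 else:
--                     total_qualifications[team]['Eliminations'] += 1
--     return total_qualifications
-- ===== SOURCE B (Python) =====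
-- def qualification_percentage(team_rankings, total_qualifications):
--     # Phase 1: count rankings per (team, bucket) into one delta counter.
--     delta = {}
--     for team, rankings in team_rankings.items():
--         if isinstance(rankings, list):
--             for r in rankings:
--                 key = 'Qualifications' if r <= 8 else ('Playoffs' if r <= 24 else 'Eliminations')
--                 delta[(team, key)] = delta.get((team, key), 0) + 1
--     # Phase 2: apply the deltas by walking the output dict once.
--     for team, counters in total_qualifications.items():
--         for key in counters:
--             counters[key] += delta.get((team, key), 0)
--     return total_qualifications
-- ===== Notes on version B (the rewrite author's own statement) =====
-- stated objective: alternative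
-- what changed: B is two-phase: it first aggregates all rankings into a single (team,bucket)->count delta dictionary, then applies the deltas in one walk over total_qualifications, instead of A's per-ranking if/elif in-place unit increments.
-- outside the precondition, e.g. on qualification_percentage({'X': [1]}, {}): A raises KeyError, B returns {}
import Mathlib
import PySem

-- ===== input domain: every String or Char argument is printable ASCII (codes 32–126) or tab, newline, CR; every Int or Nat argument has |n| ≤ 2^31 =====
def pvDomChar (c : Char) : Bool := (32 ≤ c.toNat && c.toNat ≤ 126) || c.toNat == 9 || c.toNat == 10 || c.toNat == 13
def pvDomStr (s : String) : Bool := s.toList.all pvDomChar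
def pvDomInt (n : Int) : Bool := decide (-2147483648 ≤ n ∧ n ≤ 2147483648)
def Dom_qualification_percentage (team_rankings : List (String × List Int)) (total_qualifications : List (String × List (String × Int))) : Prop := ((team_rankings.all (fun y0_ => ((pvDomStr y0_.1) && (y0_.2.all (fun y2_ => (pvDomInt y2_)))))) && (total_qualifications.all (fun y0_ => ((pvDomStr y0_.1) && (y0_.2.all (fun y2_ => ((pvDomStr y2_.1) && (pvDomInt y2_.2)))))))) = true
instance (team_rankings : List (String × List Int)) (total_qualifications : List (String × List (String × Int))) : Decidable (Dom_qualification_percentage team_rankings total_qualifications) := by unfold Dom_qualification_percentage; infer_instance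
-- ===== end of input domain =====

-- ===== PORT A =====
-- B re-implements A in two phases: aggregate a (team,bucket)->count delta dict, then apply it in
-- one walk over total_qualifications (objective: alternative decomposition). Python A/B mutate
-- total_qualifications in place and return it; the equivalence proved is about the returned value.

-- total_qualifications[team][key] += 1 (first matching entry; no-op stands for Python's KeyError,
-- which Pre_ excludes)
def pvBump1 (d : List (String × Int)) (k : String) : List (String × Int) :=
  match d with
  | [] => []
  | (k', v) :: rest => if k' = k then (k', v + 1) :: rest else (k', v) :: pvBump1 rest k

def pvBumpTeam1 (tq : List (String × List (String × Int))) (team k : String) :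
    List (String × List (String × Int)) :=
  match tq with
  | [] => []
  | (t, inner) :: rest =>
      if t = team then (t, pvBump1 inner k) :: rest else (t, inner) :: pvBumpTeam1 rest team k

def qualification_percentage (team_rankings : List (String × List Int)) (total_qualifications : List (String × List (String × Int))) : List (String × List (String × Int)) :=
  -- 'isinstance(team_rankings[team], list)' is always true under the List Int typing
  team_rankings.foldl (fun acc tl =>
    tl.2.foldl (fun acc2 r =>
      if r ≤ 8 then pvBumpTeam1 acc2 tl.1 "Qualifications"
      else if r ≤ 24 then pvBumpTeam1 acc2 tl.1 "Playoffs"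
      else pvBumpTeam1 acc2 tl.1 "Eliminations") acc) total_qualifications

-- ===== PORT B =====
def qualification_percentage_alt (team_rankings : List (String × List Int)) (total_qualifications : List (String × List (String × Int))) : List (String × List (String × Int)) :=
  -- phase 1: delta[(team, key)] = delta.get((team, key), 0) + 1 over all rankings
  let delta : PySem.Dict (String × String) Int :=
    team_rankings.foldl (fun d tl =>
      tl.2.foldl (fun d2 r =>
        let key := if r ≤ 8 then "Qualifications"
                   else if r ≤ 24 then "Playoffs" else "Eliminations"
        d2.insert (tl.1, key) (d2.getD (tl.1, key) 0 + 1)) d)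
      PySem.Dict.empty
  -- phase 2: counters[key] += delta.get((team, key), 0), walking total_qualifications
  total_qualifications.map (fun t =>
    (t.1, t.2.map (fun kv => (kv.1, kv.2 + delta.getD (t.1, kv.1) 0))))

-- ===== PRECONDITION & SPEC =====
-- Pre_ excludes exactly the inputs where Python A raises KeyError (a team whose rankings hit a
-- bucket but the team, or that bucket's counter key, is missing from total_qualifications), and
-- duplicate-key association lists, which cannot arise from Python dict arguments.
def Pre_qualification_percentage (team_rankings : List (String × List Int)) (total_qualifications : List (String × List (String × Int))) : Prop :=
  (team_rankings.map Prod.fst).Nodup ∧ (total_qualifications.map Prod.fst).Nodup ∧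
  (∀ d ∈ total_qualifications, (d.2.map Prod.fst).Nodup) ∧
  ∀ tl ∈ team_rankings, tl.2 ≠ [] →
    ∃ d ∈ total_qualifications, d.1 = tl.1 ∧
      ((∃ r ∈ tl.2, r ≤ 8) → "Qualifications" ∈ d.2.map Prod.fst) ∧
      ((∃ r ∈ tl.2, 8 < r ∧ r ≤ 24) → "Playoffs" ∈ d.2.map Prod.fst) ∧
      ((∃ r ∈ tl.2, 24 < r) → "Eliminations" ∈ d.2.map Prod.fst)
instance (team_rankings : List (String × List Int)) (total_qualifications : List (String × List (String × Int))) : Decidable (Pre_qualification_percentage team_rankings total_qualifications) := by unfold Pre_qualification_percentage; infer_instance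

def pvWitness_qualification_percentage : (List (String × List Int)) × (List (String × List (String × Int))) :=
  ([("Lille", [1, 10, 30]), ("Lyon", [8])],
   [("Lille", [("Qualifications", 0), ("Playoffs", 0), ("Eliminations", 0)]),
    ("Lyon", [("Qualifications", 2), ("Playoffs", 1), ("Eliminations", 3)])])

def Spec_qualification_percentage (team_rankings : List (String × List Int)) (total_qualifications : List (String × List (String × Int))) (out : List (String × List (String × Int))) : Prop := out = qualification_percentage_alt team_rankings total_qualifications
instance (team_rankings : List (String × List Int)) (total_qualifications : List (String × List (String × Int))) (out : List (String × List (String × Int))) : Decidable (Spec_qualification_percentage team_rankings total_qualifications out) := by unfold Spec_qualification_percentage; infer_instance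

-- ===== CLAIM (what is proved, stated in full; the proofs are below) =====
def Claim_equal_qualification_percentage : Prop := ∀ (team_rankings : List (String × List Int)) (total_qualifications : List (String × List (String × Int))), Dom_qualification_percentage team_rankings total_qualifications → Pre_qualification_percentage team_rankings total_qualifications → Spec_qualification_percentage team_rankings total_qualifications (qualification_percentage team_rankings total_qualifications)

-- ===== LEMMAS AND PROOFS =====

-- B's phase 2 as a function of the delta dict
def pvApply (delta : PySem.Dict (String × String) Int)
    (tq : List (String × List (String × Int))) : List (String × List (String × Int)) :=
  tq.map (fun t => (t.1, t.2.map (fun kv => (kv.1, kv.2 + delta.getD (t.1, kv.1) 0))))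

theorem pvApply_empty (tq : List (String × List (String × Int))) :
    pvApply PySem.Dict.empty tq = tq := by
  simp [pvApply, PySem.Dict.getD, PySem.Dict.get?, PySem.Dict.empty]

theorem map_unchanged (d : PySem.Dict (String × String) Int) (t t' k : String) (v : Int)
    (inner : List (String × Int)) (h : t' ≠ t ∨ k ∉ inner.map Prod.fst) :
    inner.map (fun kv => (kv.1, kv.2 + (d.insert (t, k) v).getD (t', kv.1) 0))
      = inner.map (fun kv => (kv.1, kv.2 + d.getD (t', kv.1) 0)) := by
  apply List.map_congr_left
  intro kv hkv
  have hne : (t', kv.1) ≠ (t, k) := by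
    rcases h with h | h
    · exact fun he => h (congrArg Prod.fst he)
    · intro he
      have hk : kv.1 = k := congrArg Prod.snd he
      exact h (hk ▸ List.mem_map_of_mem hkv)
  rw [PySem.Dict.getD_insert_of_ne _ _ _ hne]

theorem bump1_map (d : PySem.Dict (String × String) Int) (t k : String)
    (inner : List (String × Int)) (hnd : (inner.map Prod.fst).Nodup) :
    pvBump1 (inner.map (fun kv => (kv.1, kv.2 + d.getD (t, kv.1) 0))) k
      = inner.map (fun kv => (kv.1, kv.2 + (d.insert (t, k) (d.getD (t, k) 0 + 1)).getD (t, kv.1) 0)) := by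
  induction inner with
  | nil => rfl
  | cons kv rest ih =>
    simp only [List.map_cons, List.nodup_cons] at hnd ⊢
    simp only [pvBump1]
    by_cases hk : kv.1 = k
    · rw [if_pos hk, hk, PySem.Dict.getD_insert_self,
          map_unchanged d t t k _ rest (Or.inr (hk ▸ hnd.1))]
      simp [add_assoc]
    · rw [if_neg hk, PySem.Dict.getD_insert_of_ne _ _ _ (by simp [hk]), ih hnd.2]

theorem bump_insert (d : PySem.Dict (String × String) Int) (t k : String)
    (tq : List (String × List (String × Int)))
    (hT : (tq.map Prod.fst).Nodup) (hI : ∀ e ∈ tq, (e.2.map Prod.fst).Nodup) :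
    pvBumpTeam1 (pvApply d tq) t k
      = pvApply (d.insert (t, k) (d.getD (t, k) 0 + 1)) tq := by
  induction tq with
  | nil => rfl
  | cons e rest ih =>
    simp only [List.map_cons, List.nodup_cons] at hT
    simp only [pvApply, List.map_cons, pvBumpTeam1]
    by_cases ht : e.1 = t
    · rw [if_pos ht, ht]
      have hrest : ∀ e' ∈ rest, e'.1 ≠ t := fun e' he' heq =>
        hT.1 (ht ▸ heq ▸ List.mem_map_of_mem he')
      congr 1
      · rw [bump1_map d t k e.2 (hI e (List.mem_cons_self))]
      · apply List.map_congr_left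
        intro e' he'
        rw [map_unchanged d t e'.1 k _ e'.2 (Or.inl (hrest e' he'))]
    · rw [if_neg ht]
      congr 1
      · rw [map_unchanged d t e.1 k _ e.2 (Or.inl ht)]
      · have := ih hT.2 (fun e' he' => hI e' (List.mem_cons_of_mem _ he'))
        simpa [pvApply] using this

-- A's inner loop on counters already holding an applied delta = B's inner delta loop, applied
theorem inner_loop (t : String) (lst : List Int) (d : PySem.Dict (String × String) Int)
    (tq : List (String × List (String × Int)))
    (hT : (tq.map Prod.fst).Nodup) (hI : ∀ e ∈ tq, (e.2.map Prod.fst).Nodup) :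
    lst.foldl (fun acc2 r =>
      if r ≤ 8 then pvBumpTeam1 acc2 t "Qualifications"
      else if r ≤ 24 then pvBumpTeam1 acc2 t "Playoffs"
      else pvBumpTeam1 acc2 t "Eliminations") (pvApply d tq)
    = pvApply (lst.foldl (fun d2 r =>
        let key := if r ≤ 8 then "Qualifications"
                   else if r ≤ 24 then "Playoffs" else "Eliminations"
        d2.insert (t, key) (d2.getD (t, key) 0 + 1)) d) tq := by
  induction lst generalizing d with
  | nil => rfl
  | cons r rest ih =>
    simp only [List.foldl_cons]
    by_cases h1 : r ≤ 8
    · simp only [if_pos h1]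
      rw [bump_insert d t "Qualifications" tq hT hI, ih]
    · by_cases h2 : r ≤ 24
      · simp only [if_neg h1, if_pos h2]
        rw [bump_insert d t "Playoffs" tq hT hI, ih]
      · simp only [if_neg h1, if_neg h2]
        rw [bump_insert d t "Eliminations" tq hT hI, ih]

theorem outer_loop (tr : List (String × List Int)) (d : PySem.Dict (String × String) Int)
    (tq : List (String × List (String × Int)))
    (hT : (tq.map Prod.fst).Nodup) (hI : ∀ e ∈ tq, (e.2.map Prod.fst).Nodup) :
    tr.foldl (fun acc tl =>
      tl.2.foldl (fun acc2 r =>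
        if r ≤ 8 then pvBumpTeam1 acc2 tl.1 "Qualifications"
        else if r ≤ 24 then pvBumpTeam1 acc2 tl.1 "Playoffs"
        else pvBumpTeam1 acc2 tl.1 "Eliminations") acc) (pvApply d tq)
    = pvApply (tr.foldl (fun d tl =>
        tl.2.foldl (fun d2 r =>
          let key := if r ≤ 8 then "Qualifications"
                     else if r ≤ 24 then "Playoffs" else "Eliminations"
          d2.insert (tl.1, key) (d2.getD (tl.1, key) 0 + 1)) d) d) tq := by
  induction tr generalizing d with
  | nil => rfl
  | cons tl rest ih =>
    simp only [List.foldl_cons]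
    rw [inner_loop tl.1 tl.2 d tq hT hI, ih]

theorem ports_agree (tr : List (String × List Int)) (tq : List (String × List (String × Int)))
    (hT : (tq.map Prod.fst).Nodup) (hI : ∀ e ∈ tq, (e.2.map Prod.fst).Nodup) :
    qualification_percentage tr tq = qualification_percentage_alt tr tq := by
  unfold qualification_percentage qualification_percentage_alt
  have h := outer_loop tr PySem.Dict.empty tq hT hI
  rw [pvApply_empty] at h
  exact h

-- ===== VERDICT (by name: the statement is the Claim_ definition above) =====
theorem qualification_percentage_spec : Claim_equal_qualification_percentage := by
  intro tr tq _ hpre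
  exact ports_agree tr tq hpre.2.1 hpre.2.2.1
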